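-- pv_equiv track=rewrite | github.com/code4aLiving/data_structures_algorithms | Excercises/html_parsing.py | parse
-- ===== SOURCE A (Python) =====
-- def parse(html):
-- 	res = []
-- 	label = ""
-- 	for c in html:
-- 		if c == ">":
-- 			label += c
-- 			res.append(label)
-- 			label = ""
-- 		if len(label) or c == "<":
-- 			label += c
-- 	return res
-- ===== SOURCE B (Python) =====
-- def parse(html):
--     res = []
--     for part in html.split(">")[:-1]:
--         i = part.find("<")
--         res.append(part[i:] + ">" if i != -1 else ">")
--     return res
-- ===== Notes on version B (the rewrite author's own statement) =====
-- stated objective: faster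
-- what changed: Replaces the char-by-char label state machine (accumulator with two interacting ifs) by splitting on the closing bracket and a per-segment find of the first opening bracket, emitting one element per terminated segment; the per-character Python loop disappears into C-level str.split/str.find.
import Mathlib
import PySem

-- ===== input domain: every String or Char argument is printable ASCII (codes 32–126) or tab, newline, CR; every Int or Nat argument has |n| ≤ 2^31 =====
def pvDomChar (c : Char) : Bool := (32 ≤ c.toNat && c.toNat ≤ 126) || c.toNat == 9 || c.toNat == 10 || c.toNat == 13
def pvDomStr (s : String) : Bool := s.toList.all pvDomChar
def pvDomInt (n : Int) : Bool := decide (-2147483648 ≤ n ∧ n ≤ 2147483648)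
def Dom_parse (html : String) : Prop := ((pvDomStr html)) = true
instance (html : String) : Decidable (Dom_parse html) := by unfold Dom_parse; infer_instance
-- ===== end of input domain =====

-- B replaces A's char-by-char label state machine by split('>') plus a per-segment find('<'); same return values, different decomposition.


-- ===== PORT A =====
-- A's loop; the Python string `label` is carried as its list of chars (PySem string ops are defined on List Char).
def parseLoopA : List String → List Char → List Char → List String
  | res, _label, [] => res
  | res, label, c :: cs =>
    -- if c == ">": label += c; res.append(label); label = ""
    let (res, label) := if c = '>' then (res ++ [String.ofList (label ++ [c])], ([] : List Char)) else (res, label)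
    -- if len(label) or c == "<": label += c
    let label := if label.length ≠ 0 ∨ c = '<' then label ++ [c] else label
    parseLoopA res label cs

def parse (html : String) : List String := parseLoopA [] [] html.toList

-- ===== PORT B =====
def parse_alt (html : String) : List String :=
  let parts := PySem.Chars.splitOn html.toList ['>']          -- html.split(">")  (non-empty-separator split)
  (PySem.List.slice parts none (some (-1))).map (fun part =>  -- for part in parts[:-1]
    let i := PySem.Chars.find part ['<']                      -- i = part.find("<")
    if i ≠ -1 then String.ofList (PySem.Chars.slice part (some i) none ++ ['>'])  -- part[i:] + ">"
    else ">")

-- ===== PRECONDITION & SPEC =====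
def Spec_parse (html : String) (out : List String) : Prop := out = parse_alt html
instance (html : String) (out : List String) : Decidable (Spec_parse html out) := by unfold Spec_parse; infer_instance

-- ===== CLAIM (what is proved, stated in full; the proofs are below) =====
def Claim_equal_parse : Prop := ∀ (html : String), Dom_parse html → Spec_parse html (parse html)

-- ===== LEMMAS AND PROOFS =====

-- simple structural-recursion form of s.split('>') (single-char separator)
def pvSplit1 : List Char → List (List Char)
  | [] => [[]]
  | c :: cs => if c = '>' then [] :: pvSplit1 cs else (pvSplit1 cs).modifyHead (c :: ·)

lemma pvSplit1_ne_nil (cs : List Char) : pvSplit1 cs ≠ [] := by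
  cases cs with
  | nil => simp [pvSplit1]
  | cons c cs =>
    simp only [pvSplit1]
    split
    · simp
    · cases h : pvSplit1 cs with
      | nil => exact absurd h (pvSplit1_ne_nil cs)
      | cons p ps => simp

lemma splitOn_go_eq (l : List Char) : ∀ (fuel : Nat) (cur : List Char) (acc : List (List Char)),
    l.length ≤ fuel →
    PySem.Chars.splitOn.go ['>'] fuel l cur acc
      = acc.reverse ++ (pvSplit1 l).modifyHead (cur.reverse ++ ·) := by
  induction l with
  | nil =>
    intro fuel cur acc _
    cases fuel with
    | zero => rw [PySem.Chars.splitOn.go]; simp [pvSplit1]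
    | succ f => rw [PySem.Chars.splitOn.go] <;> simp [pvSplit1]
  | cons c rest ih =>
    intro fuel cur acc h
    cases fuel with
    | zero => simp at h
    | succ f =>
      rw [PySem.Chars.splitOn.go]
      by_cases hc : c = '>'
      · subst hc
        simp only [List.isPrefixOf, BEq.rfl, Bool.true_and, if_pos,
          List.length_cons, List.length_nil, List.drop_succ_cons, List.drop_zero]
        rw [ih f [] (cur.reverse :: acc) (by simpa using h)]
        cases hs : pvSplit1 rest with
        | nil => exact absurd hs (pvSplit1_ne_nil rest)
        | cons p ps => simp [pvSplit1, hs]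
      · have hpre : ['>'].isPrefixOf (c :: rest) = false := by
          simp [List.isPrefixOf]; intro h'; exact absurd h'.symm hc
        rw [hpre]
        simp only [Bool.false_eq_true, if_false]
        rw [ih f (c :: cur) acc (by simpa using h)]
        cases hs : pvSplit1 rest with
        | nil => exact absurd hs (pvSplit1_ne_nil rest)
        | cons p ps => simp [pvSplit1, hc, hs]

lemma splitOn_eq_pvSplit1 (s : List Char) : PySem.Chars.splitOn s ['>'] = pvSplit1 s := by
  rw [PySem.Chars.splitOn, splitOn_go_eq s (s.length + 1) [] [] (by omega)]
  cases h : pvSplit1 s with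
  | nil => exact absurd h (pvSplit1_ne_nil s)
  | cons p ps => simp

lemma find_go_spec (l : List Char) : ∀ (k : Nat),
    PySem.Chars.find.go ['<'] l k
      = if '<' ∈ l then ((k : Int) + ((l.takeWhile (· ≠ '<')).length : Int)) else -1 := by
  induction l with
  | nil => intro k; rw [PySem.Chars.find.go]; rfl
  | cons c t ih =>
    intro k
    rw [PySem.Chars.find.go]
    by_cases hc : c = '<'
    · subst hc; simp [List.isPrefixOf, List.takeWhile]
    · have hpre : ['<'].isPrefixOf (c :: t) = false := by
        simp [List.isPrefixOf]; intro h'; exact absurd h'.symm hc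
      rw [hpre]
      simp only [Bool.false_eq_true, if_false, ih (k+1)]
      by_cases hm : '<' ∈ t
      · simp [hm, hc, Ne.symm hc]
        ring
      · simp [hm, hc, List.mem_cons]; intro h'; exact absurd h'.symm hc

-- what B computes for one '>'-terminated segment, generalized over A's pending label
def pvEmit (label part : List Char) : String :=
  if label ≠ [] then String.ofList (label ++ part ++ ['>'])
  else if '<' ∈ part then String.ofList (part.dropWhile (· ≠ '<') ++ ['>'])
  else ">"

-- the remaining output of A's loop, as a function of the pending label
def pvRem (label : List Char) : List Char → List String
  | [] => []
  | c :: cs =>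
    if c = '>' then String.ofList (label ++ ['>']) :: pvRem [] cs
    else pvRem (if label.length ≠ 0 ∨ c = '<' then label ++ [c] else label) cs

lemma parseLoopA_eq_rem (cs : List Char) : ∀ (res : List String) (label : List Char),
    parseLoopA res label cs = res ++ pvRem label cs := by
  induction cs with
  | nil => intro res label; simp [parseLoopA, pvRem]
  | cons c cs ih =>
    intro res label
    by_cases hc : c = '>'
    · subst hc
      simp only [parseLoopA, pvRem]
      rw [ih]
      simp
    · simp only [parseLoopA, pvRem, if_neg hc]
      rw [ih]

lemma rem_eq_map (cs : List Char) : ∀ (label : List Char),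
    pvRem label cs
      = match (pvSplit1 cs).dropLast with
        | [] => []
        | p :: ps => pvEmit label p :: ps.map (pvEmit []) := by
  induction cs with
  | nil => intro label; simp [pvRem, pvSplit1]
  | cons c cs ih =>
    intro label
    by_cases hc : c = '>'
    · subst hc
      simp only [pvRem, pvSplit1]
      rw [ih []]
      cases hs : pvSplit1 cs with
      | nil => exact absurd hs (pvSplit1_ne_nil cs)
      | cons p ps =>
        cases ps with
        | nil => simp [pvEmit]
        | cons q qs =>
          simp only [List.dropLast]
          cases label with
          | nil => simp [pvEmit]
          | cons a l => simp [pvEmit]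
    · simp only [pvRem, pvSplit1, if_neg hc]
      cases hs : pvSplit1 cs with
      | nil => exact absurd hs (pvSplit1_ne_nil cs)
      | cons p ps =>
        cases ps with
        | nil =>
          -- dropLast of both sides is []
          rw [ih]
          simp [hs]
        | cons q qs =>
          rw [ih]
          simp only [hs, List.modifyHead, List.dropLast_cons₂]
          -- goal: pvEmit label' (c::p)... vs pvEmit label p
          congr 1
          by_cases hl : label = []
          · subst hl
            by_cases hlt : c = '<'
            · subst hlt; simp [pvEmit, List.dropWhile]
            · simp [pvEmit, hlt, List.mem_cons, Ne.symm hlt]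
          · have : label.length ≠ 0 := by simpa using hl
            simp [pvEmit, this, hl, show label ++ [c] ≠ [] by simp [hl]]

lemma dropWhile_eq_drop_len (p : List Char) :
    p.drop (p.takeWhile (fun x => !decide (x = '<'))).length
      = p.dropWhile (fun x => !decide (x = '<')) := by
  induction p with
  | nil => rfl
  | cons c t ih =>
    by_cases h : c = '<'
    · subst h; simp
    · simp [h, ih]

lemma emit_eq (p : List Char) :
    (if PySem.Chars.find p ['<'] ≠ -1
       then String.ofList (PySem.Chars.slice p (some (PySem.Chars.find p ['<'])) none ++ ['>'])
       else ">")
      = pvEmit [] p := by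
  have hf : PySem.Chars.find p ['<']
      = if '<' ∈ p then (((p.takeWhile (· ≠ '<')).length : Nat) : Int) else -1 := by
    have := find_go_spec p 0
    simpa [PySem.Chars.find] using this
  by_cases hm : '<' ∈ p
  · rw [hf]
    simp only [hm, if_pos]
    have hne : (((p.takeWhile (· ≠ '<')).length : Nat) : Int) ≠ -1 := by omega
    rw [if_pos hne]
    simp only [PySem.Chars.slice_eq_listSlice, PySem.List.slice_from_natCast]
    simp [pvEmit, hm]
    rw [dropWhile_eq_drop_len]
  · rw [hf]
    simp [hm, pvEmit]

theorem pv_main (html : String) : parse html = parse_alt html := by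
  unfold parse
  rw [parseLoopA_eq_rem, rem_eq_map]
  have hB : parse_alt html = List.map (pvEmit []) ((pvSplit1 html.toList).dropLast) := by
    simp only [parse_alt, splitOn_eq_pvSplit1, PySem.List.slice_to_neg_one, emit_eq]
  rw [hB]
  cases (pvSplit1 html.toList).dropLast with
  | nil => simp
  | cons p ps => simp

-- ===== VERDICT (by name: the statement is the Claim_ definition above) =====
theorem parse_spec : Claim_equal_parse := by
  intro html _
  unfold Spec_parse
  exact pv_main html
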